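-- pv_equiv track=rewrite | github.com/openradx/radis | radis/search/utils/query_parser.py | _replace_unbalanced_parentheses
-- ===== SOURCE A (Python) =====
-- def _replace_unbalanced_parentheses(input_string: str) -> str:
--     stack = []
--     result = list(input_string)
--     inside_quotes = False
--     escape_next = False
--
--     for i, char in enumerate(input_string):
--         if escape_next:
--             escape_next = False
--         elif char == "\\":
--             escape_next = True
--         elif char == '"' and not escape_next:
--             inside_quotes = not inside_quotes
--         if char == "(" and not inside_quotes:
--             stack.append(i)
--         elif char == ")" and not inside_quotes:
--             if stack:
--                 stack.pop()
--             else: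
--                 result[i] = " "
--
--     while stack:
--         result[stack.pop()] = " "
--
--     return "".join(result)
-- ===== SOURCE B (Python) =====
-- def _replace_unbalanced_parentheses(input_string: str) -> str:
--     # Pass 1: per-position inside-quotes mask (escape handling as in the parser:
--     # a backslash escapes the next character; parentheses are structural regardless).
--     mask = []
--     inside = False
--     escape = False
--     for ch in input_string:
--         if escape:
--             escape = False
--         elif ch == "\\":
--             escape = True
--         elif ch == '"':
--             inside = not inside
--         mask.append(inside)
--
--     # Pass 2 (forward): blank every unquoted closing paren with no open paren before it.
--     fwd = []
--     bal = 0
--     for ch, m in zip(input_string, mask):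
--         if not m and ch == "(":
--             bal += 1
--             fwd.append(ch)
--         elif not m and ch == ")":
--             if bal == 0:
--                 fwd.append(" ")
--             else:
--                 bal -= 1
--                 fwd.append(ch)
--         else:
--             fwd.append(ch)
--
--     # Pass 3 (backward): blank every unquoted open paren left unmatched.
--     out_rev = []
--     need = 0
--     for ch, m in zip(reversed(fwd), reversed(mask)):
--         if not m and ch == ")":
--             need += 1
--             out_rev.append(ch)
--         elif not m and ch == "(":
--             if need == 0:
--                 out_rev.append(" ")
--             else:
--                 need -= 1
--                 out_rev.append(ch)
--         else:
--             out_rev.append(ch)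
--     return "".join(reversed(out_rev))
-- ===== Notes on version B (the rewrite author's own statement) =====
-- stated objective: alternative
-- what changed: A keeps a stack of open-paren indices and blanks leftover stack entries after the loop; B instead makes three streaming passes: a quote-mask pass, a forward counting pass that blanks unmatched closing parens, and a backward counting pass that blanks unmatched opening parens - no stack of positions and no retroactive blanking.
import Mathlib
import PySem

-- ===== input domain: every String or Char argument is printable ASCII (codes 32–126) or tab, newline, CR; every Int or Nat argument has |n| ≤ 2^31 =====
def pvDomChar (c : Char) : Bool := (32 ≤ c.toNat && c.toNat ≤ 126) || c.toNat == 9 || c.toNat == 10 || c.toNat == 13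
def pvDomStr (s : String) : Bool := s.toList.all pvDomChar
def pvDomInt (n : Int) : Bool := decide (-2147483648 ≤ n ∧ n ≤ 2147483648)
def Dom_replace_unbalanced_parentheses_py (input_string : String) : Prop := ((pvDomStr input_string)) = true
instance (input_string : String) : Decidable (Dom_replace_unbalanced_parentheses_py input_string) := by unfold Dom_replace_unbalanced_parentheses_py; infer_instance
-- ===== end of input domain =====

-- B replaces A's positional stack of open-paren indices by three streaming passes
-- (quote mask, a forward counter blanking unmatched ')', backward counter blanking
-- unmatched '('); objective: alternative decomposition, same O(n) cost.

-- ===== PORT A =====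
-- the loop `for i, char in enumerate(input_string)`; the Python stack appends/pops
-- at the end, modelled here by cons/head (the list is the reversed Python stack,
-- which is irrelevant for the final while-loop that just blanks every member)
def pyA_loop : List Char → Nat → List Nat → List Char → Bool → Bool → List Nat × List Char
  | [], _, stack, result, _, _ => (stack, result)
  | c :: rest, i, stack, result, insideQuotes, escapeNext =>
    let escapeNext' := if escapeNext then false else decide (c = '\\')
    let insideQuotes' :=
      if escapeNext then insideQuotes
      else if c = '\\' then insideQuotes
      else if c = '"' then !insideQuotes else insideQuotes
    if c = '(' ∧ insideQuotes' = false then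
      pyA_loop rest (i+1) (i :: stack) result insideQuotes' escapeNext'
    else if c = ')' ∧ insideQuotes' = false then
      match stack with
      | _ :: stack' => pyA_loop rest (i+1) stack' result insideQuotes' escapeNext'
      | [] => pyA_loop rest (i+1) [] (result.set i ' ') insideQuotes' escapeNext'
    else pyA_loop rest (i+1) stack result insideQuotes' escapeNext'

def replace_unbalanced_parentheses_py (input_string : String) : String :=
  let p := pyA_loop input_string.toList 0 [] input_string.toList false false
  -- `while stack: result[stack.pop()] = " "`
  String.mk (p.1.foldl (fun r j => r.set j ' ') p.2)

-- ===== PORT B =====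
-- pass 1: per-position inside-quotes mask
def maskLoop : List Char → Bool → Bool → List Bool
  | [], _, _ => []
  | c :: rest, inside, escape =>
    let escape' := if escape then false else decide (c = '\\')
    let inside' :=
      if escape then inside
      else if c = '\\' then inside
      else if c = '"' then !inside else inside
    inside' :: maskLoop rest inside' escape'

-- pass 2 (forward): blank every unquoted closing paren with no open paren before it
def fwdLoop : List (Char × Bool) → Nat → List Char
  | [], _ => []
  | (c, m) :: rest, bal =>
    if !m ∧ c = '(' then c :: fwdLoop rest (bal + 1)
    else if !m ∧ c = ')' then
      if bal = 0 then ' ' :: fwdLoop rest 0 else c :: fwdLoop rest (bal - 1)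
    else c :: fwdLoop rest bal

-- pass 3 (backward, fed the reversed data): blank every unquoted open paren left unmatched
def bwdLoop : List (Char × Bool) → Nat → List Char
  | [], _ => []
  | (c, m) :: rest, need =>
    if !m ∧ c = ')' then c :: bwdLoop rest (need + 1)
    else if !m ∧ c = '(' then
      if need = 0 then ' ' :: bwdLoop rest 0 else c :: bwdLoop rest (need - 1)
    else c :: bwdLoop rest need

def replace_unbalanced_parentheses_py_alt (input_string : String) : String :=
  let l := input_string.toList
  let m := maskLoop l false false
  let f := fwdLoop (l.zip m) 0
  String.mk ((bwdLoop (f.reverse.zip m.reverse) 0).reverse)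

-- ===== PRECONDITION & SPEC =====
def Spec_replace_unbalanced_parentheses_py (input_string : String) (out : String) : Prop := out = replace_unbalanced_parentheses_py_alt input_string
instance (input_string : String) (out : String) : Decidable (Spec_replace_unbalanced_parentheses_py input_string out) := by unfold Spec_replace_unbalanced_parentheses_py; infer_instance

-- ===== CLAIM (what is proved, stated in full; the proofs are below) =====
def Claim_equal_replace_unbalanced_parentheses_py : Prop := ∀ (input_string : String), Dom_replace_unbalanced_parentheses_py input_string → Spec_replace_unbalanced_parentheses_py input_string (replace_unbalanced_parentheses_py input_string)

-- ===== LEMMAS AND PROOFS =====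

-- paren kind of a (char, inside-quotes) position
inductive PK | po | pc | pn
deriving DecidableEq

def kindp : Char × Bool → PK
  | (c, m) => if !m ∧ c = '(' then .po else if !m ∧ c = ')' then .pc else .pn

-- A's machine on kinds: (final stack, positions of blanked unmatched closing parens)
def kStack : List PK → Nat → List Nat → List Nat × List Nat
  | [], _, s => (s, [])
  | .po :: r, i, s => kStack r (i+1) (i :: s)
  | .pc :: r, i, s =>
    match s with
    | [] => let p := kStack r (i+1) []; (p.1, i :: p.2)
    | _ :: s' => kStack r (i+1) s'
  | .pn :: r, i, s => kStack r (i+1) s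

-- B's forward counter: positions of blanked unmatched closing parens
def kFwd : List PK → Nat → Nat → List Nat
  | [], _, _ => []
  | .po :: r, i, b => kFwd r (i+1) (b+1)
  | .pc :: r, i, b => if b = 0 then i :: kFwd r (i+1) 0 else kFwd r (i+1) (b-1)
  | .pn :: r, i, b => kFwd r (i+1) b

-- kinds after the forward pass (blanked closing parens become inert)
def kErase : List PK → Nat → List PK
  | [], _ => []
  | .po :: r, b => .po :: kErase r (b+1)
  | .pc :: r, b => if b = 0 then .pn :: kErase r 0 else .pc :: kErase r (b-1)
  | .pn :: r, b => .pn :: kErase r b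

-- B's backward counter, running over the REVERSED kind list, index descending:
-- (final counter, positions of blanked unmatched opening parens)
def bm : List PK → Nat → Nat → Nat × List Nat
  | [], _, c => (c, [])
  | .pc :: r, i, c => bm r (i-1) (c+1)
  | .po :: r, i, c => if c = 0 then ((bm r (i-1) 0).1, i :: (bm r (i-1) 0).2) else bm r (i-1) (c-1)
  | .pn :: r, i, c => bm r (i-1) c

-- blanking a set of positions, indices ascending from i / descending from i
def appOff (S : List Nat) : Nat → List (Char × Bool) → List (Char × Bool)
  | _, [] => []
  | i, (c, m) :: r => ((if i ∈ S then ' ' else c), m) :: appOff S (i+1) r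

def appDesc (S : List Nat) : Nat → List (Char × Bool) → List Char
  | _, [] => []
  | i, (c, m) :: r => (if i ∈ S then ' ' else c) :: appDesc S (i-1) r

theorem kErase_length (t : List PK) (b : Nat) : (kErase t b).length = t.length := by
  induction t generalizing b with
  | nil => rfl
  | cons k r ih => cases k <;> simp [kErase, ih] <;> split <;> simp [ih]

theorem maskLoop_length (l : List Char) (q e : Bool) : (maskLoop l q e).length = l.length := by
  induction l generalizing q e with
  | nil => rfl
  | cons c r ih => simp [maskLoop, ih]

theorem kFwd_lb (t : List PK) (i b j : Nat) (h : j ∈ kFwd t i b) : i ≤ j := by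
  induction t generalizing i b with
  | nil => simp [kFwd] at h
  | cons k r ih =>
    cases k with
    | po => exact Nat.le_of_succ_le (ih (i+1) (b+1) h)
    | pc =>
      simp only [kFwd] at h
      split at h
      · rcases List.mem_cons.1 h with h | h
        · omega
        · exact Nat.le_of_succ_le (ih (i+1) 0 h)
      · exact Nat.le_of_succ_le (ih (i+1) (b-1) h)
    | pn => exact Nat.le_of_succ_le (ih (i+1) b h)

theorem bm_ub (t : List PK) (i c j : Nat) (h : j ∈ (bm t i c).2) : j ≤ i := by
  induction t generalizing i c with
  | nil => simp [bm] at h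
  | cons k r ih =>
    cases k with
    | po =>
      simp only [bm] at h
      split at h
      · rcases List.mem_cons.1 h with h | h
        · omega
        · have := ih (i-1) 0 h; omega
      · have := ih (i-1) (c-1) h; omega
    | pc => have := ih (i-1) (c+1) h; omega
    | pn => have := ih (i-1) c h; omega

theorem appOff_cons_lt (x : Nat) (S : List Nat) (j0 : Nat) (w : List (Char × Bool))
    (h : x < j0) : appOff (x :: S) j0 w = appOff S j0 w := by
  induction w generalizing j0 with
  | nil => rfl
  | cons q w' ihw =>
    obtain ⟨c', m'⟩ := q
    have hne : j0 ≠ x := by omega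
    simp only [appOff, List.mem_cons]
    rw [ihw (j0+1) (by omega)]
    by_cases hmem : j0 ∈ S
    · simp [hmem]
    · simp [hmem, hne]

theorem appDesc_cons_gt (x : Nat) (S : List Nat) (j0 : Nat) (w : List (Char × Bool))
    (h : j0 < x) : appDesc (x :: S) j0 w = appDesc S j0 w := by
  induction w generalizing j0 with
  | nil => rfl
  | cons q w' ihw =>
    obtain ⟨c', m'⟩ := q
    have hne : j0 ≠ x := by omega
    simp only [appDesc, List.mem_cons]
    rw [ihw (j0-1) (by omega)]
    by_cases hmem : j0 ∈ S
    · simp [hmem]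
    · simp [hmem, hne]

def pkStepC : PK → Nat → Nat
  | .pc, c => c + 1
  | .po, c => if c = 0 then 0 else c - 1
  | .pn, c => c

theorem bm_append (u : List PK) (x : PK) (i c : Nat) :
    (bm (u ++ [x]) i c).1 = pkStepC x (bm u i c).1 ∧
    ∀ j, j ∈ (bm (u ++ [x]) i c).2 ↔
      j ∈ (bm u i c).2 ∨ (x = .po ∧ (bm u i c).1 = 0 ∧ j = i - u.length) := by
  induction u generalizing i c with
  | nil =>
    cases x with
    | po =>
      simp only [List.nil_append, bm, pkStepC]
      split <;> simp_all [bm]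
    | pc => simp [bm, pkStepC]
    | pn => simp [bm, pkStepC]
  | cons y u' ih =>
    cases y with
    | po =>
      simp only [List.cons_append, bm, List.length_cons]
      split
      · constructor
        · exact (ih (i-1) 0).1
        · intro j
          rw [List.mem_cons, List.mem_cons, (ih (i-1) 0).2 j]
          constructor
          · rintro (h | h | h) <;> [exact Or.inl (Or.inl h); exact Or.inl (Or.inr h);
              (right; refine ⟨h.1, h.2.1, ?_⟩; omega)]
          · rintro ((h | h) | h) <;> [exact Or.inl h; exact Or.inr (Or.inl h);
              (right; right; refine ⟨h.1, h.2.1, ?_⟩; omega)]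
      · refine ⟨(ih (i-1) (c-1)).1, fun j => ?_⟩
        rw [(ih (i-1) (c-1)).2 j]
        constructor
        · rintro (h | h) <;> [exact Or.inl h; (right; refine ⟨h.1, h.2.1, ?_⟩; omega)]
        · rintro (h | h) <;> [exact Or.inl h; (right; refine ⟨h.1, h.2.1, ?_⟩; omega)]
    | pc =>
      simp only [List.cons_append, bm, List.length_cons]
      refine ⟨(ih (i-1) (c+1)).1, fun j => ?_⟩
      rw [(ih (i-1) (c+1)).2 j]
      constructor
      · rintro (h | h) <;> [exact Or.inl h; (right; refine ⟨h.1, h.2.1, ?_⟩; omega)]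
      · rintro (h | h) <;> [exact Or.inl h; (right; refine ⟨h.1, h.2.1, ?_⟩; omega)]
    | pn =>
      simp only [List.cons_append, bm, List.length_cons]
      refine ⟨(ih (i-1) c).1, fun j => ?_⟩
      rw [(ih (i-1) c).2 j]
      constructor
      · rintro (h | h) <;> [exact Or.inl h; (right; refine ⟨h.1, h.2.1, ?_⟩; omega)]
      · rintro (h | h) <;> [exact Or.inl h; (right; refine ⟨h.1, h.2.1, ?_⟩; omega)]

-- MAIN LEMMA: A's leftover stack = B's backward-pass blank set (modulo a pending stack s)
theorem kMain (t : List PK) (i : Nat) (s : List Nat) :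
    (bm (kErase t s.length).reverse (i + t.length - 1) 0).1 ≤ s.length ∧
    ∀ j, j ∈ (kStack t i s).1 ↔
      j ∈ (bm (kErase t s.length).reverse (i + t.length - 1) 0).2 ∨
      j ∈ s.drop (bm (kErase t s.length).reverse (i + t.length - 1) 0).1 := by
  induction t generalizing i s with
  | nil => simp [kStack, kErase, bm]
  | cons k r ih =>
    have hul : ∀ b, ((kErase r b).reverse).length = r.length := fun b => by
      simp [kErase_length]
    simp only [List.length_cons]
    rw [show i + (r.length + 1) - 1 = i + r.length from by omega]
    cases k with
    | po =>
      simp only [kStack, kErase, List.reverse_cons]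
      have hap := bm_append ((kErase r (s.length+1)).reverse) .po (i + r.length) 0
      rw [hul, show i + r.length - r.length = i from by omega] at hap
      have ihh := ih (i+1) (i :: s)
      rw [show i + 1 + r.length - 1 = i + r.length from by omega] at ihh
      simp only [List.length_cons] at ihh
      refine ⟨?_, fun j => ?_⟩
      · rw [hap.1]
        rcases Nat.eq_zero_or_pos (bm (kErase r (s.length+1)).reverse (i + r.length) 0).1
          with h0 | h0
        · simp [pkStepC, h0]
        · have := ihh.1
          simp only [pkStepC, if_neg (by omega :
            ¬ (bm (kErase r (s.length+1)).reverse (i + r.length) 0).1 = 0)]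
          omega
      · rw [hap.2 j, ihh.2 j, hap.1]
        rcases Nat.eq_zero_or_pos (bm (kErase r (s.length+1)).reverse (i + r.length) 0).1
          with h0 | h0
        · simp only [h0, pkStepC, reduceIte, List.drop_zero, List.mem_cons, true_and]
          tauto
        · have hne : ¬ (bm (kErase r (s.length+1)).reverse (i + r.length) 0).1 = 0 := by omega
          have hd : (i :: s).drop (bm (kErase r (s.length+1)).reverse (i + r.length) 0).1
              = s.drop ((bm (kErase r (s.length+1)).reverse (i + r.length) 0).1 - 1) := by
            cases h' : (bm (kErase r (s.length+1)).reverse (i + r.length) 0).1 with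
            | zero => omega
            | succ n => simp
          rw [hd]
          simp only [pkStepC, if_neg hne, hne, and_false, false_and, or_false]
          tauto
    | pc =>
      cases s with
      | nil =>
        simp only [kStack, kErase, List.length_nil, List.reverse_cons, reduceIte]
        have hap := bm_append ((kErase r 0).reverse) .pn (i + r.length) 0
        have ihh := ih (i+1) ([] : List Nat)
        rw [show i + 1 + r.length - 1 = i + r.length from by omega] at ihh
        simp only [List.length_nil] at ihh
        refine ⟨by rw [hap.1]; simpa [pkStepC] using ihh.1, fun j => ?_⟩
        rw [hap.2 j]
        simp only [reduceCtorEq, false_and, or_false]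
        rw [ihh.2 j, hap.1]
        have h0 : (bm (kErase r 0).reverse (i + r.length) 0).1 = 0 := by
          have := ihh.1; omega
        simp [h0, pkStepC]
      | cons x s' =>
        simp only [kStack, kErase, List.length_cons, List.reverse_cons,
          Nat.succ_ne_zero, if_false, Nat.add_sub_cancel]
        have hap := bm_append ((kErase r s'.length).reverse) .pc (i + r.length) 0
        have ihh := ih (i+1) s'
        rw [show i + 1 + r.length - 1 = i + r.length from by omega] at ihh
        refine ⟨?_, fun j => ?_⟩
        · rw [hap.1]; simp only [pkStepC]; have := ihh.1; omega
        · rw [hap.2 j]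
          simp only [reduceCtorEq, false_and, or_false]
          rw [ihh.2 j, hap.1]
          simp only [pkStepC, List.drop_succ_cons]
    | pn =>
      simp only [kStack, kErase, List.reverse_cons]
      have hap := bm_append ((kErase r s.length).reverse) .pn (i + r.length) 0
      have ihh := ih (i+1) s
      rw [show i + 1 + r.length - 1 = i + r.length from by omega] at ihh
      refine ⟨by rw [hap.1]; simpa [pkStepC] using ihh.1, fun j => ?_⟩
      rw [hap.2 j]
      simp only [reduceCtorEq, false_and, or_false]
      rw [ihh.2 j, hap.1]
      simp only [pkStepC]

-- A's blanked-closing-paren set is computed by the forward counter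
theorem kF (t : List PK) (i : Nat) (s : List Nat) :
    (kStack t i s).2 = kFwd t i s.length := by
  induction t generalizing i s with
  | nil => rfl
  | cons k r ih =>
    cases k with
    | po =>
      have := ih (i+1) (i :: s)
      simpa [kStack, kFwd] using this
    | pc =>
      cases s with
      | nil => simp [kStack, kFwd, ih (i+1) ([] : List Nat)]
      | cons x s' => simp [kStack, kFwd, ih (i+1) s']
    | pn => simp [kStack, kFwd, ih (i+1) s]

-- A's loop is the kind machine, with the closing-paren blanks applied by a foldl
theorem pyA_loop_eq (l : List Char) (i : Nat) (s : List Nat) (res : List Char) (iq en : Bool) :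
    pyA_loop l i s res iq en =
      (((kStack ((l.zip (maskLoop l iq en)).map kindp) i s).1),
       ((kStack ((l.zip (maskLoop l iq en)).map kindp) i s).2).foldl (fun r j => r.set j ' ') res) := by
  induction l generalizing i s res iq en with
  | nil => simp [pyA_loop, maskLoop, kStack]
  | cons c rest ih =>
    simp only [pyA_loop, maskLoop, List.zip_cons_cons, List.map_cons]
    set iq' := (if en then iq else if c = '\\' then iq else if c = '"' then !iq else iq) with hiq
    set en' := (if en then false else decide (c = '\\')) with hen
    by_cases h1 : c = '(' ∧ iq' = false
    · have hk : kindp (c, iq') = .po := by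
        simp [kindp, h1.1, h1.2]
      rw [if_pos h1, hk]
      simp only [kStack]
      exact ih (i+1) (i :: s) res iq' en'
    · by_cases h2 : c = ')' ∧ iq' = false
      · have hk : kindp (c, iq') = .pc := by
          simp [kindp, h2.1, h2.2]
        rw [if_neg h1, if_pos h2, hk]
        cases s with
        | nil =>
          simp only [kStack]
          rw [ih (i+1) ([] : List Nat) (res.set i ' ') iq' en']
          simp [List.foldl_cons]
        | cons x s' =>
          simp only [kStack]
          exact ih (i+1) s' res iq' en'
      · have hk : kindp (c, iq') = .pn := by
          cases hq : iq' with
          | false =>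
            have hc1 : c ≠ '(' := fun h => h1 ⟨h, hq⟩
            have hc2 : c ≠ ')' := fun h => h2 ⟨h, hq⟩
            simp [kindp, hc1, hc2]
          | true => simp [kindp]
        rw [if_neg h1, if_neg h2, hk]
        simp only [kStack]
        exact ih (i+1) s res iq' en'

-- forward pass = blanking of the forward counter's set
theorem fwdLoop_eq (z : List (Char × Bool)) (i b : Nat) :
    (fwdLoop z b).zip (z.map Prod.snd) = appOff (kFwd (z.map kindp) i b) i z := by
  induction z generalizing i b with
  | nil => rfl
  | cons p r ih =>
    obtain ⟨c, m⟩ := p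
    simp only [fwdLoop, List.map_cons, kindp]
    by_cases h1 : (!m) = true ∧ c = '('
    · rw [if_pos h1, if_pos h1]
      simp only [kFwd, appOff, List.zip_cons_cons]
      have hni : i ∉ kFwd (r.map kindp) (i+1) (b+1) := fun h => by
        have := kFwd_lb _ _ _ _ h; omega
      rw [if_neg hni]
      exact congrArg _ (ih (i+1) (b+1))
    · by_cases h2 : (!m) = true ∧ c = ')'
      · rw [if_neg h1, if_pos h2, if_neg h1, if_pos h2]
        simp only [kFwd]
        by_cases hb : b = 0
        · subst hb
          simp only [reduceIte]
          simp only [appOff, List.zip_cons_cons, List.mem_cons]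
          simp only [true_or, if_true]
          rw [appOff_cons_lt i _ (i+1) r (by omega)]
          exact congrArg _ (ih (i+1) 0)
        · rw [if_neg hb, if_neg hb]
          simp only [appOff, List.zip_cons_cons]
          have hni : i ∉ kFwd (r.map kindp) (i+1) (b-1) := fun h => by
            have := kFwd_lb _ _ _ _ h; omega
          rw [if_neg hni]
          exact congrArg _ (ih (i+1) (b-1))
      · rw [if_neg h1, if_neg h2, if_neg h1, if_neg h2]
        simp only [kFwd, appOff, List.zip_cons_cons]
        have hni : i ∉ kFwd (r.map kindp) (i+1) b := fun h => by
          have := kFwd_lb _ _ _ _ h; omega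
        rw [if_neg hni]
        exact congrArg _ (ih (i+1) b)

-- kinds after the forward blanking = kErase
theorem appOff_kinds (z : List (Char × Bool)) (i b : Nat) :
    (appOff (kFwd (z.map kindp) i b) i z).map kindp = kErase (z.map kindp) b := by
  induction z generalizing i b with
  | nil => rfl
  | cons p r ih =>
    obtain ⟨c, m⟩ := p
    simp only [List.map_cons]
    by_cases h1 : (!m) = true ∧ c = '('
    · have hk : kindp (c, m) = .po := by simp [kindp, h1]
      rw [hk]
      simp only [kFwd, kErase, appOff]
      have hni : i ∉ kFwd (r.map kindp) (i+1) (b+1) := fun h => by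
        have := kFwd_lb _ _ _ _ h; omega
      rw [if_neg hni]
      simp only [List.map_cons, hk]
      exact congrArg _ (ih (i+1) (b+1))
    · by_cases h2 : (!m) = true ∧ c = ')'
      · have hk : kindp (c, m) = .pc := by simp [kindp, h1, h2]
        rw [hk]
        simp only [kFwd, kErase]
        by_cases hb : b = 0
        · subst hb
          simp only [reduceIte]
          simp only [appOff, List.mem_cons, List.map_cons]
          simp only [true_or, if_true]
          have hsp : kindp (' ', m) = .pn := by
            cases m <;> simp [kindp]
          rw [hsp]
          refine congrArg _ ?_
          rw [appOff_cons_lt i _ (i+1) r (by omega)]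
          exact ih (i+1) 0
        · rw [if_neg hb, if_neg hb]
          simp only [appOff]
          have hni : i ∉ kFwd (r.map kindp) (i+1) (b-1) := fun h => by
            have := kFwd_lb _ _ _ _ h; omega
          rw [if_neg hni]
          simp only [List.map_cons, hk]
          exact congrArg _ (ih (i+1) (b-1))
      · have hk : kindp (c, m) = .pn := by
          cases m with
          | true => simp [kindp]
          | false =>
            have hc1 : c ≠ '(' := fun h => h1 ⟨by simp, h⟩
            have hc2 : c ≠ ')' := fun h => h2 ⟨by simp, h⟩
            simp [kindp, hc1, hc2]
        rw [hk]
        simp only [kFwd, kErase, appOff]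
        have hni : i ∉ kFwd (r.map kindp) (i+1) b := fun h => by
          have := kFwd_lb _ _ _ _ h; omega
        rw [if_neg hni]
        simp only [List.map_cons, hk]
        exact congrArg _ (ih (i+1) b)

-- backward pass = blanking of the backward counter's set (indices descending from i)
theorem bwdLoop_eq (w : List (Char × Bool)) (i k : Nat) (hw : w.length ≤ i + 1) :
    bwdLoop w k = appDesc (bm (w.map kindp) i k).2 i w := by
  induction w generalizing i k with
  | nil => rfl
  | cons p r ih =>
    obtain ⟨c, m⟩ := p
    have hr : r.length ≤ (i - 1) + 1 := by
      simp only [List.length_cons] at hw; omega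
    have hni : ∀ c', i ∉ (bm (r.map kindp) (i-1) c').2 := by
      intro c' h
      have hub := bm_ub _ _ _ _ h
      cases r with
      | nil => simp [bm] at h
      | cons q r' =>
        simp only [List.length_cons] at hw
        omega
    simp only [bwdLoop, List.map_cons, kindp]
    by_cases h2 : (!m) = true ∧ c = ')'
    · have : ¬ ((!m) = true ∧ c = '(') := by
        rintro ⟨hm, hc⟩; rw [hc] at h2; simp at h2
      rw [if_pos h2, if_neg this, if_pos h2]
      simp only [bm, appDesc]
      rw [if_neg (hni (k+1))]
      exact congrArg _ (ih (i-1) (k+1) hr)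
    · by_cases h1 : (!m) = true ∧ c = '('
      · have : ¬ ((!m) = true ∧ c = ')') := by
          rintro ⟨hm, hc⟩; rw [hc] at h1; simp at h1
        rw [if_neg this, if_pos h1, if_pos h1]
        simp only [bm]
        by_cases hk : k = 0
        · subst hk
          simp only [reduceIte]
          simp only [appDesc, List.mem_cons]
          simp only [true_or, if_true]
          refine congrArg _ ?_
          cases r with
          | nil => rfl
          | cons q r' =>
            have hi1 : i - 1 < i := by
              simp only [List.length_cons] at hw; omega
            rw [appDesc_cons_gt i _ (i-1) _ hi1]
            exact ih (i-1) 0 hr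
        · rw [if_neg hk, if_neg hk]
          simp only [appDesc]
          rw [if_neg (hni (k-1))]
          exact congrArg _ (ih (i-1) (k-1) hr)
      · rw [if_neg h2, if_neg h1, if_neg h2, if_neg h1]
        simp only [bm, appDesc]
        rw [if_neg (hni k)]
        exact congrArg _ (ih (i-1) k hr)

theorem foldl_set_length (ps : List Nat) (res : List Char) :
    (ps.foldl (fun r j => r.set j ' ') res).length = res.length := by
  induction ps generalizing res with
  | nil => rfl
  | cons i ps ih => simp only [List.foldl_cons]; rw [ih]; simp

theorem foldl_set_getElem (ps : List Nat) (res : List Char) (j : Nat)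
    (h : j < (ps.foldl (fun r j => r.set j ' ') res).length) :
    (ps.foldl (fun r j => r.set j ' ') res)[j] =
      if j ∈ ps then ' ' else res[j]'(by rw [foldl_set_length] at h; exact h) := by
  induction ps generalizing res with
  | nil => simp
  | cons i ps ih =>
    simp only [List.foldl_cons] at h ⊢
    rw [ih (res.set i ' ') h, List.getElem_set]
    by_cases hji : j ∈ ps
    · simp [hji]
    · by_cases hij : i = j <;> simp [hij, hji, List.mem_cons] <;> omega

theorem appOff_length (S : List Nat) (i : Nat) (z : List (Char × Bool)) :
    (appOff S i z).length = z.length := by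
  induction z generalizing i with
  | nil => rfl
  | cons p r ih => obtain ⟨c, m⟩ := p; simp [appOff, ih]

theorem appOff_getElem (S : List Nat) (z : List (Char × Bool)) (i j : Nat)
    (h : j < (appOff S i z).length) :
    (appOff S i z)[j] =
      ((if (i + j) ∈ S then ' '
        else (z[j]'(by rw [appOff_length] at h; exact h)).1),
       (z[j]'(by rw [appOff_length] at h; exact h)).2) := by
  induction z generalizing i j with
  | nil => simp [appOff] at h
  | cons p r ih =>
    obtain ⟨c, m⟩ := p
    cases j with
    | zero => simp [appOff]
    | succ j' =>
      simp only [appOff, List.getElem_cons_succ]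
      have h' : j' < (appOff S (i+1) r).length := by
        simp only [appOff, List.length_cons] at h; omega
      rw [ih (i+1) j' h']
      have : i + 1 + j' = i + (j' + 1) := by omega
      rw [this]

theorem appDesc_length (S : List Nat) (i : Nat) (z : List (Char × Bool)) :
    (appDesc S i z).length = z.length := by
  induction z generalizing i with
  | nil => rfl
  | cons p r ih => obtain ⟨c, m⟩ := p; simp [appDesc, ih]

theorem appDesc_getElem (S : List Nat) (z : List (Char × Bool)) (i j : Nat)
    (h : j < (appDesc S i z).length) :
    (appDesc S i z)[j] =
      (if (i - j) ∈ S then ' '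
       else (z[j]'(by rw [appDesc_length] at h; exact h)).1) := by
  induction z generalizing i j with
  | nil => simp [appDesc] at h
  | cons p r ih =>
    obtain ⟨c, m⟩ := p
    cases j with
    | zero => simp [appDesc]
    | succ j' =>
      simp only [appDesc, List.getElem_cons_succ]
      have h' : j' < (appDesc S (i-1) r).length := by
        simp only [appDesc, List.length_cons] at h; omega
      rw [ih (i-1) j' h']
      have : i - 1 - j' = i - (j' + 1) := by omega
      rw [this]

theorem fwdLoop_length (z : List (Char × Bool)) (b : Nat) :
    (fwdLoop z b).length = z.length := by
  induction z generalizing b with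
  | nil => rfl
  | cons p r ih =>
    obtain ⟨c, m⟩ := p
    simp only [fwdLoop]
    split
    · simp [ih]
    · split
      · split <;> simp [ih]
      · simp [ih]

theorem zip_rev {α β : Type} (f : List α) (m : List β) (h : f.length = m.length) :
    f.reverse.zip m.reverse = (f.zip m).reverse := by
  apply List.ext_getElem
  · simp [h]
  · intro j h1 h2
    rw [List.getElem_zip, List.getElem_reverse, List.getElem_reverse, List.getElem_reverse,
      List.getElem_zip]
    simp only [List.length_zip, h, Nat.min_self]

-- ===== VERDICT (by name: the statement is the Claim_ definition above) =====
theorem replace_unbalanced_parentheses_py_spec : Claim_equal_replace_unbalanced_parentheses_py := by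
  intro s _
  unfold Spec_replace_unbalanced_parentheses_py
  unfold replace_unbalanced_parentheses_py replace_unbalanced_parentheses_py_alt
  simp only []
  set l := s.toList with hl
  set m := maskLoop l false false with hm
  set z := l.zip m with hz
  set tags := z.map kindp with htags
  have hml : m.length = l.length := maskLoop_length l false false
  have hzl : z.length = l.length := by rw [hz, List.length_zip, hml, Nat.min_self]
  have htl : tags.length = l.length := by rw [htags, List.length_map, hzl]
  have hmsnd : z.map Prod.snd = m := List.map_snd_zip (by omega)
  -- A side
  rw [pyA_loop_eq]
  set st := (kStack tags 0 []).1 with hst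
  have hcb : (kStack tags 0 []).2 = kFwd tags 0 0 := kF tags 0 []
  rw [hcb]
  set cb := kFwd tags 0 0 with hcbdef
  -- B side
  set f := fwdLoop z 0 with hf
  have hfl : f.length = l.length := by rw [hf, fwdLoop_length, hzl]
  have hfz : f.zip m = appOff cb 0 z := by
    rw [hf, ← hmsnd]; exact fwdLoop_eq z 0 0
  have hwrev : f.reverse.zip m.reverse = (f.zip m).reverse := zip_rev f m (by omega)
  rw [hwrev, hfz]
  set w := (appOff cb 0 z).reverse with hw
  have hwl : w.length = l.length := by rw [hw, List.length_reverse, appOff_length, hzl]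
  have hwk : w.map kindp = (kErase tags 0).reverse := by
    rw [hw, List.map_reverse, appOff_kinds]
  rw [bwdLoop_eq w (l.length - 1) 0 (by omega)]
  rw [hwk]
  set SB := (bm (kErase tags 0).reverse (l.length - 1) 0).2 with hSB
  -- the main set equality
  have hmain := kMain tags 0 ([] : List Nat)
  simp only [List.length_nil, Nat.zero_add, List.drop_nil, List.not_mem_nil, or_false,
    htl] at hmain
  have hstiff : ∀ j, j ∈ st ↔ j ∈ SB := fun j => hmain.2 j
  -- elementwise comparison
  apply congrArg String.mk
  apply List.ext_getElem
  · rw [foldl_set_length, foldl_set_length, List.length_reverse, appDesc_length, hwl]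
  · intro j hj1 hj2
    have hjl : j < l.length := by
      rw [foldl_set_length, foldl_set_length] at hj1; exact hj1
    rw [foldl_set_getElem _ _ _ hj1,
      foldl_set_getElem _ _ _ (by rw [foldl_set_length]; exact hjl)]
    rw [List.getElem_reverse, appDesc_getElem]
    have hidx1 : (appDesc SB (l.length - 1) w).length - 1 - j = l.length - 1 - j := by
      rw [appDesc_length, hwl]
    simp only [hidx1]
    have hidx2 : l.length - 1 - (l.length - 1 - j) = j := by omega
    rw [hidx2]
    have hwj : ∀ (hh : l.length - 1 - j < w.length),
        w[l.length - 1 - j]'hh =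
          (appOff cb 0 z)[j]'(by rw [appOff_length, hzl]; omega) := by
      intro hh
      simp only [hw]
      rw [List.getElem_reverse]
      have : (appOff cb 0 z).length - 1 - (l.length - 1 - j) = j := by
        rw [appOff_length, hzl]; omega
      simp only [this]
    rw [hwj, appOff_getElem]
    have hzj : ∀ (hh : j < z.length), (z[j]'hh).1 = l[j]'hjl := by
      intro hh; simp only [hz, List.getElem_zip]
    simp only [Nat.zero_add, hzj]
    by_cases hjSB : j ∈ SB
    · have : j ∈ st := (hstiff j).2 hjSB
      simp [this, hjSB]
    · have : j ∉ st := fun h => hjSB ((hstiff j).1 h)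
      simp [this, hjSB]
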